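-- pv_equiv track=rewrite | github.com/stolniceanudenisa/Python-Algorithms-and-Programming | Seminare/exercitii/Problema2.py | aparitii
-- ===== SOURCE A (Python) =====
-- def aparitii(n):
--     ap1=[0,0,0,0,0,0,0,0,0,0]
--     while n>0:
--         c=n%10
--         ap1[c]+=1
--         n=n//10
--     nr=0
--     for i in range(9,0,-1):
--         while ap1[i]!=0:
--             nr=nr*10+i
--             ap1[i]-=1
--     return nr
-- ===== SOURCE B (Python) =====
-- def aparitii(n):
--     digits = []
--     while n > 0:
--         d = n % 10
--         if d != 0:
--             digits.append(d)
--         n //= 10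
--     nr = 0
--     for d in sorted(digits, reverse=True):
--         nr = nr * 10 + d
--     return nr
-- ===== Notes on version B (the rewrite author's own statement) =====
-- stated objective: simpler
-- what changed: Replaces the fixed ten-bucket counting tally plus bucket-walk emission with collecting the nonzero digits into a list and sorting it descending with Python's built-in sort before folding into the result.
import Mathlib
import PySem

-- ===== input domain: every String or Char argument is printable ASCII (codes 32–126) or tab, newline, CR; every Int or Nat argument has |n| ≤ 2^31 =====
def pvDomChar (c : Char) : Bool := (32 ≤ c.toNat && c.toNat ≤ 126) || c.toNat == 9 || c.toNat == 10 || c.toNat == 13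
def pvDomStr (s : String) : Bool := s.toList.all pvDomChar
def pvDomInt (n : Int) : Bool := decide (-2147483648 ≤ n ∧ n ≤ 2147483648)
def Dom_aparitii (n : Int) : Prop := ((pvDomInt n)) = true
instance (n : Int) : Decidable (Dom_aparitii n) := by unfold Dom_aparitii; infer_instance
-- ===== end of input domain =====

-- B replaces A's ten-bucket counting tally and bucket-walk emission with sorting the list of
-- nonzero digits descending and folding it into the result; objective: simpler.


-- ===== PORT A =====
-- termination helper for the digit-extraction loops (cited by decreasing_by)
theorem pvDivTen_lt (n : Int) (h : 0 < n) : (PySem.Int.floordiv n 10).toNat < n.toNat := by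
  rw [PySem.Int.floordiv_eq_ediv_of_pos (by omega)]
  have h1 := Int.mul_ediv_add_emod n 10
  have h2 := Int.emod_nonneg n (show (10:Int) ≠ 0 by omega)
  have h3 := Int.emod_lt_of_pos n (show (0:Int) < 10 by omega)
  have h4 : 0 ≤ n / 10 := Int.ediv_nonneg (by omega) (by omega)
  omega

-- `while n>0: c=n%10; ap1[c]+=1; n=n//10`  (c = n%10 lies in 0..9, so the index is in range)
def countLoop (n : Int) (ap : List Int) : List Int :=
  if h : 0 < n then
    let c := PySem.Int.mod n 10
    countLoop (PySem.Int.floordiv n 10) (ap.set c.toNat (ap.getD c.toNat 0 + 1))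
  else ap
termination_by n.toNat
decreasing_by exact pvDivTen_lt n h

-- `while ap1[i]!=0: nr=nr*10+i; ap1[i]-=1`; the counts in ap1 are nonnegative, so Python's
-- test `!=0` is written `0 <` here only to make the loop total (exact wherever A returns).
def innerW (i : Int) (st : Int × List Int) : Int × List Int :=
  if h : 0 < st.2.getD i.toNat 0 then
    innerW i (st.1 * 10 + i, st.2.set i.toNat (st.2.getD i.toNat 0 - 1))
  else st
termination_by (st.2.getD i.toNat 0).toNat
decreasing_by
  have hlt : i.toNat < st.2.length := by
    by_contra hge
    rw [List.getD_eq_getElem?_getD, List.getElem?_eq_none (by omega)] at h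
    simp at h
  simp only [List.getD_eq_getElem?_getD, List.getElem?_set_self hlt]
  simp only [List.getD_eq_getElem?_getD, List.getElem?_eq_getElem hlt] at *
  simp at *
  omega

def aparitii (n : Int) : Int :=
  let ap1 := countLoop n [0,0,0,0,0,0,0,0,0,0]
  ((PySem.List.pyRange 9 0 (-1)).foldl (fun st i => innerW i st) (0, ap1)).1

-- ===== PORT B =====
-- `while n>0: d=n%10; if d!=0: digits.append(d); n//=10`
def digitsOf (n : Int) : List Int :=
  if h : 0 < n then
    let d := PySem.Int.mod n 10
    (if d ≠ 0 then [d] else []) ++ digitsOf (PySem.Int.floordiv n 10)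
  else []
termination_by n.toNat
decreasing_by exact pvDivTen_lt n h

-- `nr = 0; for d in sorted(digits, reverse=True): nr = nr*10 + d`
def aparitii_alt (n : Int) : Int :=
  (PySem.List.sorted (digitsOf n) (fun x => x) true).foldl (fun nr d => nr * 10 + d) 0

-- ===== PRECONDITION & SPEC =====
def Spec_aparitii (n : Int) (out : Int) : Prop := out = aparitii_alt n
instance (n : Int) (out : Int) : Decidable (Spec_aparitii n out) := by unfold Spec_aparitii; infer_instance

-- ===== CLAIM (what is proved, stated in full; the proofs are below) =====
def Claim_equal_aparitii : Prop := ∀ (n : Int), Dom_aparitii n → Spec_aparitii n (aparitii n)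

-- ===== LEMMAS AND PROOFS =====

-- all digits of n, least significant first (including zeros)
def digitsAll (n : Int) : List Int :=
  if h : 0 < n then PySem.Int.mod n 10 :: digitsAll (PySem.Int.floordiv n 10) else []
termination_by n.toNat
decreasing_by exact pvDivTen_lt n h

-- the common descending digit list both ports fold over
def descList (n : Int) : List Int :=
  [9, 8, 7, 6, 5, 4, 3, 2, 1].flatMap (fun i => List.replicate ((digitsAll n).count i) i)

theorem digitsAll_bound (n : Int) : ∀ d ∈ digitsAll n, 0 ≤ d ∧ d < 10 := by
  fun_induction digitsAll n with
  | case1 n h ih =>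
    intro d hd
    rw [List.mem_cons] at hd
    rcases hd with h1 | h1
    · subst h1
      rw [PySem.Int.mod_eq_emod_of_pos (by omega)]
      exact ⟨Int.emod_nonneg n (by omega), Int.emod_lt_of_pos n (by omega)⟩
    · exact ih d h1
  | case2 => intro d hd; simp at hd

theorem digitsOf_eq_filter (n : Int) : digitsOf n = (digitsAll n).filter (fun d => d ≠ 0) := by
  fun_induction digitsOf n with
  | case1 n h d ih =>
    have hd : d = PySem.Int.mod n 10 := rfl
    rw [digitsAll, dif_pos h, List.filter_cons, ih]
    simp [hd]
    split_ifs <;> simp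
  | case2 n h => rw [digitsAll, dif_neg h]; simp

theorem countLoop_getD_fuel (N : Nat) : ∀ (n : Int), n.toNat ≤ N → ∀ (ap : List Int), ap.length = 10 → ∀ (j : Nat),
    (countLoop n ap).getD j 0 = ap.getD j 0 + ((digitsAll n).count (j : Int) : Int) := by
  induction N with
  | zero =>
    intro n hN ap hlen j
    have h : ¬ 0 < n := by omega
    rw [countLoop, dif_neg h, digitsAll, dif_neg h]; simp
  | succ N ihN =>
    intro n hN ap hlen j
    by_cases h : 0 < n
    case neg => rw [countLoop, dif_neg h, digitsAll, dif_neg h]; simp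
    rw [countLoop, dif_pos h]
    simp only []
    have hmod : PySem.Int.mod n 10 = n % 10 := PySem.Int.mod_eq_emod_of_pos (by omega)
    have hb0 : 0 ≤ n % 10 := Int.emod_nonneg n (by omega)
    have hb1 : n % 10 < 10 := Int.emod_lt_of_pos n (by omega)
    have hclt : (n % 10).toNat < ap.length := by omega
    have ih := ihN (PySem.Int.floordiv n 10) (by have := pvDivTen_lt n h; omega)
    rw [hmod]
    rw [ih (ap.set (n % 10).toNat (ap.getD (n % 10).toNat 0 + 1)) (by simp [hlen]) j]
    rw [show digitsAll n = PySem.Int.mod n 10 :: digitsAll (PySem.Int.floordiv n 10) from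
        by rw [digitsAll, dif_pos h], List.count_cons, hmod]
    by_cases hj : j = (n % 10).toNat
    · subst hj
      simp only [List.getD_eq_getElem?_getD, List.getElem?_set_self hclt]
      have hcast : (((n % 10).toNat : Int)) = n % 10 := by omega
      simp [hcast]
      omega
    · have hne : ¬ ((j : Int) = n % 10) := by omega
      have hne' : ¬ (n % 10 = (j : Int)) := by omega
      simp only [List.getD_eq_getElem?_getD]
      rw [List.getElem?_set_ne (by omega)]
      simp [hne']

theorem countLoop_getD (n : Int) (ap : List Int) (hlen : ap.length = 10) (j : Nat) :
    (countLoop n ap).getD j 0 = ap.getD j 0 + ((digitsAll n).count (j : Int) : Int) :=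
  countLoop_getD_fuel n.toNat n (le_refl _) ap hlen j

theorem set_zero_self (ap : List Int) (j : Nat) (h : ap.getD j 0 = 0) : ap.set j 0 = ap := by
  apply List.ext_getElem (by simp)
  intro k hk1 hk2
  rw [List.getElem_set]
  split
  · rename_i hkj; subst hkj
    rw [List.getD_eq_getElem?_getD, List.getElem?_eq_getElem hk2] at h
    simpa using h.symm
  · rfl

theorem innerW_eq (i : Int) (k : Nat) : ∀ (nr : Int) (ap : List Int),
    ap.getD i.toNat 0 = (k : Int) →
    innerW i (nr, ap) =
      ((List.replicate k i).foldl (fun a d => a * 10 + d) nr, ap.set i.toNat 0) := by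
  induction k with
  | zero =>
    intro nr ap h
    rw [innerW]
    simp only at h ⊢
    rw [h]
    rw [dif_neg (by omega), set_zero_self ap i.toNat h]
    simp
  | succ m ih =>
    intro nr ap h
    have h' : ap.getD i.toNat 0 = (m : Int) + 1 := by push_cast at h; exact h
    have hlt : i.toNat < ap.length := by
      by_contra hge
      rw [List.getD_eq_getElem?_getD, List.getElem?_eq_none (by omega)] at h'
      simp at h'; omega
    rw [innerW]
    simp only at h' ⊢
    rw [h', dif_pos (by omega)]
    have h2 : (ap.set i.toNat ((m : Int) + 1 - 1)).getD i.toNat 0 = (m : Int) := by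
      simp only [List.getD_eq_getElem?_getD, List.getElem?_set_self hlt]
      simp
    rw [ih (nr * 10 + i) (ap.set i.toNat ((m : Int) + 1 - 1)) h2, List.set_set]
    simp [List.replicate_succ]

theorem fold_innerW (L : List Int) : ∀ (nr : Int) (ap : List Int),
    L.Pairwise (fun a b => a.toNat ≠ b.toNat) →
    (∀ i ∈ L, 0 ≤ ap.getD i.toNat 0) →
    (L.foldl (fun st i => innerW i st) (nr, ap)).1 =
      (L.flatMap (fun i => List.replicate (ap.getD i.toNat 0).toNat i)).foldl
        (fun a d => a * 10 + d) nr := by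
  induction L with
  | nil => intro nr ap _ _; rfl
  | cons i t ih =>
    intro nr ap hpw hnn
    rw [List.pairwise_cons] at hpw
    have hnn0 : 0 ≤ ap.getD i.toNat 0 := hnn i List.mem_cons_self
    have hk : ap.getD i.toNat 0 = (((ap.getD i.toNat 0).toNat : Nat) : Int) := by omega
    rw [List.foldl_cons, innerW_eq i (ap.getD i.toNat 0).toNat nr ap hk]
    have hsame : ∀ j ∈ t, (ap.set i.toNat 0).getD j.toNat 0 = ap.getD j.toNat 0 := by
      intro j hj
      have hne : j.toNat ≠ i.toNat := (hpw.1 j hj).symm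
      simp only [List.getD_eq_getElem?_getD]
      rw [List.getElem?_set_ne (by omega)]
    rw [ih ((List.replicate (ap.getD i.toNat 0).toNat i).foldl (fun a d => a * 10 + d) nr)
        (ap.set i.toNat 0) hpw.2 (fun j hj => (hsame j hj) ▸ hnn j (List.mem_cons_of_mem i hj))]
    rw [List.flatMap_cons, List.foldl_append]
    congr 1
    exact List.flatMap_congr (fun j hj => by rw [hsame j hj])

theorem aparitii_eq_fold (n : Int) :
    aparitii n = (descList n).foldl (fun a d => a * 10 + d) 0 := by
  have hR : PySem.List.pyRange 9 0 (-1) = [9, 8, 7, 6, 5, 4, 3, 2, 1] := by decide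
  have hlen : ([0,0,0,0,0,0,0,0,0,0] : List Int).length = 10 := by decide
  have hget : ∀ j : Nat, (countLoop n [0,0,0,0,0,0,0,0,0,0]).getD j 0 =
      ((digitsAll n).count (j : Int) : Int) := by
    intro j
    rw [countLoop_getD n _ hlen j]
    by_cases hj : j < 10
    · interval_cases j <;> simp
    · rw [List.getD_eq_getElem?_getD, List.getElem?_eq_none (by simpa [hlen] using by omega)]
      simp
  rw [aparitii, hR]
  rw [fold_innerW [9, 8, 7, 6, 5, 4, 3, 2, 1] 0 _ (by decide)
      (by intro i hi; rw [show i.toNat = ((i.toNat : Nat)) from rfl, hget]; omega)]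
  unfold descList
  congr 1
  apply List.flatMap_congr
  intro i hi
  fin_cases hi <;> · rw [hget]; simp

theorem count_descList (n a : Int) : (descList n).count a = (digitsOf n).count a := by
  rw [digitsOf_eq_filter]
  by_cases hin : 1 ≤ a ∧ a ≤ 9
  · obtain ⟨h1, h2⟩ := hin
    have hfa : ((digitsAll n).filter (fun d => d ≠ 0)).count a = (digitsAll n).count a := by
      apply List.count_filter
      simp
      omega
    rw [hfa]
    interval_cases a <;>
      simp [descList, List.flatMap_cons, List.count_append, List.count_replicate]
  · have h1 : (descList n).count a = 0 := by
      apply List.count_eq_zero.2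
      intro hmem
      rw [descList, List.mem_flatMap] at hmem
      obtain ⟨i, hi, hrep⟩ := hmem
      have := List.eq_of_mem_replicate hrep
      subst this
      fin_cases hi <;> omega
    have h2 : ((digitsAll n).filter (fun d => d ≠ 0)).count a = 0 := by
      apply List.count_eq_zero.2
      intro hmem
      rw [List.mem_filter] at hmem
      have hb := digitsAll_bound n a hmem.1
      have : a ≠ 0 := by simpa using hmem.2
      omega
    rw [h1, h2]

theorem pairwise_rep_app (a : Int) (k : Nat) (l : List Int)
    (hl : l.Pairwise (fun x y => y ≤ x)) (hm : ∀ b ∈ l, b ≤ a) :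
    (List.replicate k a ++ l).Pairwise (fun x y => y ≤ x) := by
  rw [List.pairwise_append]
  refine ⟨?_, hl, ?_⟩
  · apply List.pairwise_replicate.2
    right; exact le_refl a
  · intro x hx y hy
    rw [List.eq_of_mem_replicate hx]
    exact hm y hy

theorem descList_pairwise (n : Int) : (descList n).Pairwise (fun x y => y ≤ x) := by
  unfold descList
  simp only [List.flatMap_cons, List.flatMap_nil, List.append_nil]
  repeat apply pairwise_rep_app
  · exact List.pairwise_replicate.2 (Or.inr (le_refl 1))
  all_goals
    intro b hb
    simp only [List.mem_append, List.mem_replicate] at hb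
    omega

theorem sorted_eq_descList (n : Int) :
    PySem.List.sorted (digitsOf n) (fun x => x) true = descList n := by
  haveI : Std.Antisymm (fun x y : Int => y ≤ x) := ⟨fun a b h1 h2 => le_antisymm h2 h1⟩
  apply List.Perm.eq_of_pairwise' (r := fun x y : Int => y ≤ x)
  · have := PySem.List.sorted_pairwise_rev (xs := digitsOf n) (key := fun x => x)
    simpa using this
  · exact descList_pairwise n
  · exact (PySem.List.sorted_perm (digitsOf n) (fun x => x) true).trans
      (List.perm_iff_count.2 (fun a => ((count_descList n a).symm)))

-- ===== VERDICT (by name: the statement is the Claim_ definition above) =====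
theorem aparitii_spec : Claim_equal_aparitii := by
  intro n _
  unfold Spec_aparitii aparitii_alt
  rw [sorted_eq_descList, aparitii_eq_fold]
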